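-- pv_equiv track=rewrite | github.com/hebelmx/Veriqan | Prisma/scripts/archive/xunit-old-versions/fix_xunit1026_corrected.py | clean_duplicate_parameter_usage
-- ===== SOURCE A (Python) =====
-- def clean_duplicate_parameter_usage(content: str, param_name: str) -> str:
--     """Remove duplicate parameter usage statements."""
--     lines = content.split('\n')
--     cleaned_lines = []
--     shouldly_usage_found = False
--
--     for line in lines:
--         # Skip duplicate discard statements
--         if f'_ = {param_name};' in line and 'xUnit1026 fix' in line:
--             continue
--
--         # Keep only one Shouldly usage per parameter
--         if f'{param_name}.ShouldNotBeNull()' in line: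
--             if not shouldly_usage_found:
--                 cleaned_lines.append(line)
--                 shouldly_usage_found = True
--             # Skip duplicate Shouldly usage
--             continue
--
--         cleaned_lines.append(line)
--
--     return '\n'.join(cleaned_lines)
-- ===== SOURCE B (Python) =====
-- def clean_duplicate_parameter_usage(content: str, param_name: str) -> str:
--     """Remove duplicate parameter usage statements.
--
--     Stateless strategy: first locate the index of the sole Shouldly line to
--     keep, then select lines with a pure per-index predicate (no running flag).
--     """
--     discard = f'_ = {param_name};'
--     shouldly = f'{param_name}.ShouldNotBeNull()'
--     lines = content.split('\n')
--
--     def dropped(line):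
--         return discard in line and 'xUnit1026 fix' in line
--
--     keep_idx = next((i for i, line in enumerate(lines)
--                      if shouldly in line and not dropped(line)), -1)
--     return '\n'.join(line for i, line in enumerate(lines)
--                      if not dropped(line) and (shouldly not in line or i == keep_idx))
-- ===== Notes on version B (the rewrite author's own statement) =====
-- stated objective: alternative
-- what changed: Replaces A's stateful scan (a running seen-flag deciding per line) by a stateless two-step strategy: first find the index of the single Shouldly line to keep, then select lines with a pure per-index predicate over enumerate.
import Mathlib
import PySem

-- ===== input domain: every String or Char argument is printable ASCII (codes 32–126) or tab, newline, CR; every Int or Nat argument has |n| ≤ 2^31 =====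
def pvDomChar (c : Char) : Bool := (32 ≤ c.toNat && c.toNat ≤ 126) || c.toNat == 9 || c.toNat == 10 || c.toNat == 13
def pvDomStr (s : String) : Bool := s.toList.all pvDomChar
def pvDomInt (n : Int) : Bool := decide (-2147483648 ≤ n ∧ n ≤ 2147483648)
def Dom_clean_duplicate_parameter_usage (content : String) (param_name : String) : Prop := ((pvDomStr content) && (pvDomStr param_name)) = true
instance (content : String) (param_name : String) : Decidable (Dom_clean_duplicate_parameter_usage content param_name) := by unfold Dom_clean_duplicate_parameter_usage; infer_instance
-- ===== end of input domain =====

-- B replaces A's stateful flag-carrying loop by a stateless two-step strategy: first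
-- locate the index of the one Shouldly line to keep, then select lines by a pure
-- per-index predicate; objective: alternative decomposition, same cost.

-- ===== PORT A =====
-- one step of A's loop body over the state (cleaned_lines, shouldly_usage_found)
def pvStepA (param_name : String) (st : List String × Bool) (line : String) : List String × Bool :=
  if PySem.Str.isIn ("_ = " ++ param_name ++ ";") line && PySem.Str.isIn "xUnit1026 fix" line then
    st
  else if PySem.Str.isIn (param_name ++ ".ShouldNotBeNull()") line then
    if !st.2 then (st.1 ++ [line], true) else st
  else
    (st.1 ++ [line], st.2)

def clean_duplicate_parameter_usage (content : String) (param_name : String) : String :=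
  let lines := (PySem.Str.split? content "\n").getD []   -- the separator is non-empty, so split? is always `some` here
  let final := lines.foldl (pvStepA param_name) ([], false)
  PySem.Str.join "\n" final.1

-- ===== PORT B =====
-- B's `next(...)` over `enumerate(lines)`: first index (from i) of a line that is
-- shouldly and not dropped, else -1
def pvFindB (dropped shouldly : String → Bool) (i : Int) : List String → Int
  | [] => -1
  | line :: rest =>
    if shouldly line && !dropped line then i else pvFindB dropped shouldly (i + 1) rest

-- B's final generator over `enumerate(lines)` with the stateless per-index predicate
def pvSelB (dropped shouldly : String → Bool) (keepIdx : Int) (i : Int) : List String → List String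
  | [] => []
  | line :: rest =>
    if !dropped line && (!shouldly line || i == keepIdx) then
      line :: pvSelB dropped shouldly keepIdx (i + 1) rest
    else
      pvSelB dropped shouldly keepIdx (i + 1) rest

def clean_duplicate_parameter_usage_alt (content : String) (param_name : String) : String :=
  let discard := "_ = " ++ param_name ++ ";"
  let shouldly := param_name ++ ".ShouldNotBeNull()"
  let lines := (PySem.Str.split? content "\n").getD []
  let dropped := fun line => PySem.Str.isIn discard line && PySem.Str.isIn "xUnit1026 fix" line
  let isSh := fun line => PySem.Str.isIn shouldly line
  let keepIdx := pvFindB dropped isSh 0 lines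
  PySem.Str.join "\n" (pvSelB dropped isSh keepIdx 0 lines)

-- ===== PRECONDITION & SPEC =====
def Spec_clean_duplicate_parameter_usage (content : String) (param_name : String) (out : String) : Prop := out = clean_duplicate_parameter_usage_alt content param_name
instance (content : String) (param_name : String) (out : String) : Decidable (Spec_clean_duplicate_parameter_usage content param_name out) := by unfold Spec_clean_duplicate_parameter_usage; infer_instance

-- ===== CLAIM (what is proved, stated in full; the proofs are below) =====
def Claim_equal_clean_duplicate_parameter_usage : Prop := ∀ (content : String) (param_name : String), Dom_clean_duplicate_parameter_usage content param_name → Spec_clean_duplicate_parameter_usage content param_name (clean_duplicate_parameter_usage content param_name)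

-- ===== LEMMAS AND PROOFS =====
-- With the flag already set (seen = true) and any keep index strictly below the current
-- position, A's remaining fold produces exactly B's stateless selection of the rest.
theorem pvLoopSeen (pd ps : String → Bool) (lines : List String) :
    ∀ (acc : List String) (i k : Int), k < i →
      (lines.foldl (fun st line =>
          if pd line then st
          else if ps line then (if !st.2 then (st.1 ++ [line], true) else st)
          else (st.1 ++ [line], st.2)) (acc, true)).1 =
        acc ++ pvSelB pd ps k i lines := by
  induction lines with
  | nil => intro acc i k _; simp [pvSelB]
  | cons line rest ih =>
    intro acc i k hk
    have hk' : k < i + 1 := by omega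
    have hne : (i == k) = false := by simp; omega
    cases hpd : pd line with
    | true => simpa [hpd, pvSelB] using ih acc (i + 1) k hk'
    | false =>
      cases hps : ps line with
      | true => simpa [hpd, hps, hne, pvSelB] using ih acc (i + 1) k hk'
      | false => simpa [hpd, hps, pvSelB] using ih (acc ++ [line]) (i + 1) k hk'

-- Before the flag is set, A's fold from position i equals B's selection keyed by the
-- first matching index found from i.
theorem pvLoopEq (pd ps : String → Bool) (lines : List String) :
    ∀ (acc : List String) (i : Int),
      (lines.foldl (fun st line =>
          if pd line then st
          else if ps line then (if !st.2 then (st.1 ++ [line], true) else st)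
          else (st.1 ++ [line], st.2)) (acc, false)).1 =
        acc ++ pvSelB pd ps (pvFindB pd ps i lines) i lines := by
  induction lines with
  | nil => intro acc i; simp [pvSelB]
  | cons line rest ih =>
    intro acc i
    cases hpd : pd line with
    | true => simpa [hpd, pvFindB, pvSelB] using ih acc (i + 1)
    | false =>
      cases hps : ps line with
      | true =>
        have hlt : i < i + 1 := by omega
        simpa [hpd, hps, pvFindB, pvSelB] using
          pvLoopSeen pd ps rest (acc ++ [line]) (i + 1) i hlt
      | false => simpa [hpd, hps, pvFindB, pvSelB] using ih (acc ++ [line]) (i + 1)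

-- ===== VERDICT (by name: the statement is the Claim_ definition above) =====
theorem clean_duplicate_parameter_usage_spec : Claim_equal_clean_duplicate_parameter_usage := by
  intro content param_name _
  unfold Spec_clean_duplicate_parameter_usage clean_duplicate_parameter_usage
    clean_duplicate_parameter_usage_alt
  have h := pvLoopEq
      (fun line => PySem.Str.isIn ("_ = " ++ param_name ++ ";") line &&
        PySem.Str.isIn "xUnit1026 fix" line)
      (fun line => PySem.Str.isIn (param_name ++ ".ShouldNotBeNull()") line)
      ((PySem.Str.split? content "\n").getD []) [] 0
  exact congrArg (PySem.Str.join "\n") h  -- pvStepA unfolds definitionally to the lemma's step lambda
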